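-- pv_equiv track=rewrite | github.com/abj54/Python-CS110-HWs- | dictionary/scrabble.py | ind
-- ===== SOURCE A (Python) =====
-- def rem(x,list):
--     "'x is any value which is to be removed from list just once'"
--     if list==[]:
--         return[]
--     elif list[0]==x:
--         return list[1:]
--     else:
--         return [list[0]]+rem(x,list[1:])
--
-- def ind(LIST, S):
--     "'LIST is a set of characters whereas S is a word and here we will find \
-- the total number of continious letters from S that matches in the list and \
-- is stored in parameter 'v''"
--     v=0
--     if S:
--         if S[0] in LIST:
--             return 1+v+ind(rem(S[0],LIST),S[1:]) # here rem is used to remove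
--                                      # the first letter found in the list from it
--         else:
--             return 0   #if any letter from word is not in list, we don't need that word
--     else:
--         return 0
-- ===== SOURCE B (Python) =====
-- def ind(LIST, S):
--     counts = {}
--     for x in LIST:
--         counts[x] = counts.get(x, 0) + 1
--     v = 0
--     for ch in S:
--         if counts.get(ch, 0) > 0:
--             counts[ch] = counts.get(ch, 0) - 1
--             v += 1
--         else:
--             break
--     return v
-- ===== Notes on version B (the rewrite author's own statement) =====
-- stated objective: faster
-- what changed: Replace the quadratic recursion (each matched letter removed from LIST by a linear rem pass) with a one-pass frequency dictionary built once over LIST and decremented while scanning S.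
import Mathlib
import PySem

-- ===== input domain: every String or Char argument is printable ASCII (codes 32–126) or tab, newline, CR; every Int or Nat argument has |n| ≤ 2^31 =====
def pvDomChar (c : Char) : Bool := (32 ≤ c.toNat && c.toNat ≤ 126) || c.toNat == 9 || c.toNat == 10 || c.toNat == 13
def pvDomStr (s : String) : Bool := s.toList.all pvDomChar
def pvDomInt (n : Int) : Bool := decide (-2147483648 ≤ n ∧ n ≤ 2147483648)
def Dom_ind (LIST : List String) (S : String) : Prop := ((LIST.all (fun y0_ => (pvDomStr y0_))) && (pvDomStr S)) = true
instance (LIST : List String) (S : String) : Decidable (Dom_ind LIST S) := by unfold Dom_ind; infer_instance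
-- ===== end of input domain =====

-- B replaces A's quadratic recursion (rem-pass per matched letter) with a frequency dict built once; objective: faster (asymptotic).


-- ===== PORT A =====
-- rem x l : remove x from l just once (A's helper, literal)
def rem (x : String) (l : List String) : List String :=
  match l with
  | [] => []
  | y :: t => if y = x then t else y :: rem x t

-- A's recursion; S is consumed character by character (S[0] is a 1-char string in Python)
def indAux (LIST : List String) (s : List Char) : Int :=
  match s with
  | [] => 0
  | c :: rest =>
    if (String.mk [c]) ∈ LIST then
      1 + 0 + indAux (rem (String.mk [c]) LIST) rest
    else 0

def ind (LIST : List String) (S : String) : Int := indAux LIST S.toList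

-- ===== PORT B =====
-- loop over S, decrementing counts, with break
def indAltAux (counts : PySem.Dict String Int) (s : List Char) (v : Int) : Int :=
  match s with
  | [] => v
  | c :: rest =>
    let k := String.mk [c]
    if counts.getD k 0 > 0 then
      indAltAux (counts.insert k (counts.getD k 0 - 1)) rest (v + 1)
    else v

def ind_alt (LIST : List String) (S : String) : Int :=
  indAltAux (LIST.foldl (fun d x => d.insert x (d.getD x 0 + 1)) PySem.Dict.empty) S.toList 0

-- ===== PRECONDITION & SPEC =====
def Spec_ind (LIST : List String) (S : String) (out : Int) : Prop := out = ind_alt LIST S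
instance (LIST : List String) (S : String) (out : Int) : Decidable (Spec_ind LIST S out) := by unfold Spec_ind; infer_instance

-- ===== CLAIM (what is proved, stated in full; the proofs are below) =====
def Claim_equal_ind : Prop := ∀ (LIST : List String) (S : String), Dom_ind LIST S → Spec_ind LIST S (ind LIST S)

-- ===== LEMMAS AND PROOFS =====

theorem rem_count_self (x : String) (l : List String) (h : x ∈ l) :
    ((rem x l).count x : Int) = (l.count x : Int) - 1 := by
  induction l with
  | nil => cases h
  | cons y t ih =>
    by_cases hy : y = x
    · subst hy
      simp [rem, List.count_cons]
    · have hx : x ∈ t := by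
        cases h with
        | head => exact absurd rfl hy
        | tail _ h' => exact h'
      simp only [rem, if_neg hy, List.count_cons]
      have hne : ¬ (x == y) = true := by simp [beq_iff_eq]; exact fun e => hy e.symm
      have h2 := ih hx
      simp only [beq_iff_eq, if_neg hy, Nat.add_zero]
      exact h2

theorem rem_count_ne (x j : String) (l : List String) (h : j ≠ x) :
    (rem x l).count j = l.count j := by
  induction l with
  | nil => simp [rem]
  | cons y t ih =>
    by_cases hy : y = x
    · subst hy
      simp [rem, List.count_cons, Ne.symm h]
    · simp [rem, if_neg hy, List.count_cons, ih]

theorem main_inv (s : List Char) :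
    ∀ (L : List String) (d : PySem.Dict String Int) (v : Int),
      (∀ k, d.getD k 0 = (L.count k : Int)) →
      indAltAux d s v = v + indAux L s := by
  induction s with
  | nil => intro L d v _; simp [indAltAux, indAux]
  | cons c rest ih =>
    intro L d v hinv
    simp only [indAltAux, indAux]
    by_cases hmem : (String.mk [c]) ∈ L
    · have hcnt : 0 < L.count (String.mk [c]) := List.count_pos_iff.mpr hmem
      have hpos : d.getD (String.mk [c]) 0 > 0 := by
        rw [hinv]; exact_mod_cast hcnt
      rw [if_pos hpos, if_pos hmem]
      have hinv' : ∀ k, (d.insert (String.mk [c]) (d.getD (String.mk [c]) 0 - 1)).getD k 0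
          = ((rem (String.mk [c]) L).count k : Int) := by
        intro k
        rw [PySem.Dict.getD_insert]
        by_cases hk : k = String.mk [c]
        · subst hk
          simp only [hinv]
          rw [rem_count_self _ _ hmem]
          simp
        · rw [if_neg hk, hinv, rem_count_ne _ _ _ hk]
      rw [ih _ _ _ hinv']
      ring
    · have hz : ¬ d.getD (String.mk [c]) 0 > 0 := by
        rw [hinv]
        have : L.count (String.mk [c]) = 0 := by
          simp [List.count_eq_zero]; exact hmem
        simp [this]
      rw [if_neg hz, if_neg hmem]
      ring

-- ===== VERDICT (by name: the statement is the Claim_ definition above) =====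
theorem ind_spec : Claim_equal_ind := by
  intro LIST S _
  unfold Spec_ind ind ind_alt
  rw [main_inv]
  · ring
  · intro k
    rw [PySem.Dict.foldl_insert_getD_add_one_eq_counter, PySem.Dict.getD_counter]
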